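-- pv_equiv track=rewrite | github.com/alfredronning/adventofcode | 2021/day15/solver2.py | upsize_board
-- ===== SOURCE A (Python) =====
-- def upsize_board(board, scale):
--     big_board = []
--     for i in range(scale):
--         for row in board:
--             new_row = []
--             for j in range(scale):
--                 new_row += [(n+i+j-1)%9+1 for n in row]
--             big_board.append(new_row)
--     return big_board
-- ===== SOURCE B (Python) =====
-- def upsize_board(board, scale):
--     h = len(board)
--     big = []
--     for r in range(h * scale):
--         src = board[r % h]
--         w = len(src)
--         big.append([(src[c % w] + r // h + c // w - 1) % 9 + 1
--                     for c in range(w * scale)])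
--     return big
-- ===== Notes on version B (the rewrite author's own statement) =====
-- stated objective: alternative
-- what changed: Replaces A's three nested tile-copy loops (outer tile index i, row, inner tile index j appending incremented fragments) with a single pass over output coordinates that derives tile offsets by // and the source cell by %.
import Mathlib
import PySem

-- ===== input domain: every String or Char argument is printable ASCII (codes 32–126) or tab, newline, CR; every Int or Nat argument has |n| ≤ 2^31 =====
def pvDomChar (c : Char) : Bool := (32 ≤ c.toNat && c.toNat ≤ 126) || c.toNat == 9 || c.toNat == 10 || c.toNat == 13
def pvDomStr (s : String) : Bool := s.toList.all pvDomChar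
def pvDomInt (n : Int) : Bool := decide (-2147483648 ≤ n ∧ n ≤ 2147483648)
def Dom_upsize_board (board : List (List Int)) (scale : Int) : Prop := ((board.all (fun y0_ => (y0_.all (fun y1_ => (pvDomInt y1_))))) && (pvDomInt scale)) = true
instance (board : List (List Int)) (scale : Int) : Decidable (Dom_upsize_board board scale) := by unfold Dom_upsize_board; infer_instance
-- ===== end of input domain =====

-- B iterates the output coordinates directly, computing tile offsets by // and the source cell by %,
-- instead of A's three nested tile-copy loops; same cost (objective: alternative).

-- ===== PORT A =====
def upsize_board (board : List (List Int)) (scale : Int) : List (List Int) :=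
  (PySem.List.pyRange 0 scale 1).foldl (fun big_board i =>
    board.foldl (fun big_board row =>
      big_board ++ [(PySem.List.pyRange 0 scale 1).foldl (fun new_row j =>
        new_row ++ row.map (fun n => PySem.Int.mod (n + i + j - 1) 9 + 1)) []]) big_board) []

-- ===== PORT B =====
def pvRowB (board : List (List Int)) (scale r : Int) : List Int :=
  -- body of B's loop: src = board[r % h], w = len(src)
  (PySem.List.pyRange 0 (((PySem.List.pyGetD board (PySem.Int.mod r board.length) []).length : Int) * scale) 1).map
    (fun c =>
      PySem.Int.mod (PySem.List.pyGetD (PySem.List.pyGetD board (PySem.Int.mod r board.length) [])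
          (PySem.Int.mod c ((PySem.List.pyGetD board (PySem.Int.mod r board.length) []).length : Int)) 0
        + PySem.Int.floordiv r (board.length : Int)
        + PySem.Int.floordiv c ((PySem.List.pyGetD board (PySem.Int.mod r board.length) []).length : Int) - 1) 9 + 1)

def upsize_board_alt (board : List (List Int)) (scale : Int) : List (List Int) :=
  (PySem.List.pyRange 0 ((board.length : Int) * scale) 1).foldl
    (fun big r => big ++ [pvRowB board scale r]) []

-- ===== PRECONDITION & SPEC =====
def Spec_upsize_board (board : List (List Int)) (scale : Int) (out : List (List Int)) : Prop := out = upsize_board_alt board scale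
instance (board : List (List Int)) (scale : Int) (out : List (List Int)) : Decidable (Spec_upsize_board board scale out) := by unfold Spec_upsize_board; infer_instance

-- ===== CLAIM (what is proved, stated in full; the proofs are below) =====
def Claim_equal_upsize_board : Prop := ∀ (board : List (List Int)) (scale : Int), Dom_upsize_board board scale → Spec_upsize_board board scale (upsize_board board scale)

-- ===== LEMMAS AND PROOFS =====

-- Reading xs by index over range gives xs itself.
lemma map_getD_range {α β : Type} (xs : List α) (d : α) (g : α → β) :
    (List.range xs.length).map (fun t => g (xs.getD t d)) = xs.map g := by
  apply List.ext_getElem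
  · simp
  · intro i h1 h2
    simp [List.getD_eq_getElem?_getD, List.getElem?_eq_getElem (by simpa using h2)]

-- Core tiling lemma: a single pass over w*s output positions, taking the source
-- element by % and the tile index by /, equals s concatenated passes over xs.
lemma tile {α β : Type} (xs : List α) (d : α) (f : α → Nat → β) (s : Nat) :
    (List.range (xs.length * s)).map
        (fun c => f (xs.getD (c % xs.length) d) (c / xs.length))
    = (List.range s).flatMap (fun j => xs.map (fun x => f x j)) := by
  induction s with
  | zero => simp
  | succ s ih =>
    rcases Nat.eq_zero_or_pos xs.length with hw | hw
    · rw [List.length_eq_zero_iff] at hw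
      subst hw; simp
    · have hmul : xs.length * (s + 1) = xs.length * s + xs.length := by ring
      rw [hmul, List.range_add, List.map_append, ih, List.range_succ,
        List.flatMap_append, List.flatMap_singleton]
      congr 1
      rw [List.map_map]
      have hcong : ∀ t ∈ List.range xs.length,
          ((fun c => f (xs.getD (c % xs.length) d) (c / xs.length)) ∘
            (fun t => xs.length * s + t)) t
          = (fun t => f (xs.getD t d) s) t := by
        intro t ht
        have htlt : t < xs.length := List.mem_range.mp ht
        have hm : (xs.length * s + t) % xs.length = t := by
          rw [Nat.add_comm, Nat.add_mul_mod_self_left, Nat.mod_eq_of_lt htlt]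
        have hd : (xs.length * s + t) / xs.length = s := by
          rw [Nat.mul_add_div hw, Nat.div_eq_of_lt htlt, Nat.add_zero]
        simp [hm, hd]
      rw [List.map_congr_left hcong]
      exact map_getD_range xs d (fun x => f x s)

-- pyRange 0 n 1 for a Nat bound is the casted List.range.
lemma pyRange_zero_nat_cast (s : Nat) :
    PySem.List.pyRange 0 (s : Int) 1 = (List.range s).map (fun k : Nat => (k : Int)) := by
  have h0 : ((s : Int) - 0).toNat = s := by simp
  rw [PySem.List.pyRange_one, h0]
  apply List.map_congr_left
  intro k _
  simp

-- the inner cell value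
def pvCell (n : Int) (i j : Nat) : Int := PySem.Int.mod (n + (i : Int) + (j : Int) - 1) 9 + 1

-- canonical form both ports reduce to
def pvCanon (board : List (List Int)) (s : Nat) : List (List Int) :=
  (List.range s).flatMap (fun i => board.map (fun row =>
    (List.range s).flatMap (fun j => row.map (fun n => pvCell n i j))))

lemma portA_canon (board : List (List Int)) (s : Nat) :
    upsize_board board (s : Int) = pvCanon board s := by
  unfold upsize_board pvCanon
  rw [pyRange_zero_nat_cast]
  have hrow : ∀ (i : Int) (big : List (List Int)),
      board.foldl (fun big row =>
        big ++ [((List.range s).map (fun k : Nat => (k : Int))).foldl (fun nr j =>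
          nr ++ row.map (fun n => PySem.Int.mod (n + i + j - 1) 9 + 1)) []]) big =
      big ++ board.map (fun row =>
        ((List.range s).map (fun k : Nat => (k : Int))).foldl (fun nr j =>
          nr ++ row.map (fun n => PySem.Int.mod (n + i + j - 1) 9 + 1)) []) := by
    intro i big
    rw [PySem.List.foldl_append_singleton_eq_map]
  simp only [hrow]
  rw [PySem.List.foldl_append_eq_flatMap, List.nil_append, List.flatMap_map]
  apply List.flatMap_congr
  intro i _
  apply List.map_congr_left
  intro row _
  rw [PySem.List.foldl_append_eq_flatMap, List.nil_append, List.flatMap_map]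
  rfl

lemma portB_canon (board : List (List Int)) (s : Nat) :
    upsize_board_alt board (s : Int) = pvCanon board s := by
  unfold upsize_board_alt pvCanon
  have hH : ((board.length : Int) * (s : Int)) = ((board.length * s : Nat) : Int) := by
    push_cast; ring
  rw [hH, pyRange_zero_nat_cast, List.foldl_map, PySem.List.foldl_append_singleton_eq_map,
    List.nil_append]
  have houter : ∀ r ∈ List.range (board.length * s),
      pvRowB board (s : Int) ((r : Nat) : Int)
      = (List.range ((board.getD (r % board.length) []).length * s)).map
          (fun c => pvCell ((board.getD (r % board.length) []).getD (c % (board.getD (r % board.length) []).length) 0)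
            (r / board.length) (c / (board.getD (r % board.length) []).length)) := by
    intro r _
    unfold pvRowB
    simp only [PySem.Int.mod_natCast, PySem.Int.floordiv_natCast, PySem.List.pyGetD_natCast]
    have hW : (((board.getD (r % board.length) []).length : Int) * (s : Int))
        = (((board.getD (r % board.length) []).length * s : Nat) : Int) := by push_cast; ring
    rw [hW, pyRange_zero_nat_cast, List.map_map]
    apply List.map_congr_left
    intro c _
    simp only [Function.comp, PySem.Int.mod_natCast, PySem.Int.floordiv_natCast,
      PySem.List.pyGetD_natCast, pvCell]
  rw [List.map_congr_left houter]
  rw [tile board [] (fun row r => (List.range (row.length * s)).map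
        (fun c => pvCell (row.getD (c % row.length) 0) r (c / row.length))) s]
  apply List.flatMap_congr
  intro i _
  apply List.map_congr_left
  intro row _
  exact tile row 0 (fun n i' => pvCell n i i') s

-- ===== VERDICT (by name: the statement is the Claim_ definition above) =====
theorem upsize_board_spec : Claim_equal_upsize_board := by
  intro board scale _
  unfold Spec_upsize_board
  rcases (by omega : scale ≤ 0 ∨ 0 < scale) with hs | hs
  · have hA : PySem.List.pyRange 0 scale 1 = [] := PySem.List.pyRange_one_eq_nil hs
    have hB : PySem.List.pyRange 0 ((board.length : Int) * scale) 1 = [] :=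
      PySem.List.pyRange_one_eq_nil (mul_nonpos_of_nonneg_of_nonpos (by positivity) hs)
    unfold upsize_board upsize_board_alt
    rw [hA, hB]
    rfl
  · obtain ⟨s, rfl⟩ : ∃ s : Nat, scale = (s : Int) := ⟨scale.toNat, (Int.toNat_of_nonneg hs.le).symm⟩
    rw [portA_canon, portB_canon]
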